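-- pv_equiv track=rewrite | github.com/tvquizphd/pokedoku | util/config.py | parse_generations
-- ===== SOURCE A (Python) =====
-- def parse_generations(games):
--     gen_dict = dict()
--     all_gen_ids = set([
--        game['generation'] for game in games.values()
--     ])
--     gen_dexes = {
--         gen: [
--             game for (gid, game) in games.items()
--             if gen == game['generation']
--         ]
--         for gen in list(all_gen_ids)
--     }
--     return gen_dexes
-- ===== SOURCE B (Python) =====
-- def parse_generations(games):
--     gen_dexes = {}
--     for game in games.values():
--         gen_dexes.setdefault(game['generation'], []).append(game)
--     return gen_dexes
-- ===== Notes on version B (the rewrite author's own statement) =====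
-- stated objective: simpler
-- what changed: Replaces the build-a-set-of-generation-ids-then-rescan-the-whole-dict-per-generation approach with a single pass that appends each game to a per-generation list obtained with dict.setdefault.
import Mathlib
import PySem

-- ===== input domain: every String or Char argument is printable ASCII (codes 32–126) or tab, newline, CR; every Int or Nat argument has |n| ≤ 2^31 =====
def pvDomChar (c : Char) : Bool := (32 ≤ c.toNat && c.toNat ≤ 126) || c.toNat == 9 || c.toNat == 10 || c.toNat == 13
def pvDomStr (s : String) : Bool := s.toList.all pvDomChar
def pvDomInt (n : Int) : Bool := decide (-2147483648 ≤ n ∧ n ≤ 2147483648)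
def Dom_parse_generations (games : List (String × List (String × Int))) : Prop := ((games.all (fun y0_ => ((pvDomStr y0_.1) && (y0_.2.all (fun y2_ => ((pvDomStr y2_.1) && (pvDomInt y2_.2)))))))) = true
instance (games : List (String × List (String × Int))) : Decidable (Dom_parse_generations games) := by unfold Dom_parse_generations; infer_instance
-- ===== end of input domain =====

-- B groups the games in ONE pass with dict.setdefault instead of A's set-of-generation-ids
-- followed by a full rescan of the dict per generation (objective: simpler).

-- game['generation'] — first-match lookup; the KeyError case (no "generation" key) is excluded by Pre_,
-- so the default 0 is never the value used on admitted inputs.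
def pvGen (g : List (String × Int)) : Int := (PySem.Dict.mk g).getD "generation" 0

-- ===== PORT A =====
def parse_generations (games : List (String × List (String × Int))) : List (Int × List (List (String × Int))) :=
  let all_gen_ids : PySem.Set Int := PySem.Set.ofList (games.map (fun g => pvGen g.2))
  all_gen_ids.map (fun gen => (gen, (games.filter (fun g => gen == pvGen g.2)).map (fun g => g.2)))

-- ===== PORT B =====
def parse_generations_alt (games : List (String × List (String × Int))) : List (Int × List (List (String × Int))) :=
  (games.foldl
    (fun (d : PySem.Dict Int (List (List (String × Int)))) g =>
      d.modify (pvGen g.2) [] (fun cur => cur ++ [g.2]))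
    PySem.Dict.empty).items

-- ===== PRECONDITION & SPEC =====
-- Pre_ excludes association lists with duplicate outer or inner keys (not representable as the Python
-- dicts both programs receive) and games lacking a "generation" key (both programs raise KeyError there).
def Pre_parse_generations (games : List (String × List (String × Int))) : Prop :=
  (games.map Prod.fst).Nodup ∧ ∀ g ∈ games, (g.2.map Prod.fst).Nodup ∧ "generation" ∈ g.2.map Prod.fst
instance (games : List (String × List (String × Int))) : Decidable (Pre_parse_generations games) := by
  unfold Pre_parse_generations; infer_instance

def pvWitness_parse_generations : (List (String × List (String × Int))) :=
  [("bulbasaur", [("generation", 1)]), ("chikorita", [("generation", 2), ("dex", 152)]), ("ivysaur", [("generation", 1)])]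

def Spec_parse_generations (games : List (String × List (String × Int))) (out : List (Int × List (List (String × Int)))) : Prop := out = parse_generations_alt games
instance (games : List (String × List (String × Int))) (out : List (Int × List (List (String × Int)))) : Decidable (Spec_parse_generations games out) := by unfold Spec_parse_generations; infer_instance

-- ===== CLAIM (what is proved, stated in full; the proofs are below) =====
def Claim_equal_parse_generations : Prop := ∀ (games : List (String × List (String × Int))), Dom_parse_generations games → Pre_parse_generations games → Spec_parse_generations games (parse_generations games)

-- ===== LEMMAS AND PROOFS =====

-- B's fold builds exactly the dict whose keys are the distinct generation ids in first-occurrence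
-- order and whose value at each id is the list of games with that generation, in games order.
theorem pv_items_eq (games : List (String × List (String × Int))) :
    (games.foldl
      (fun (d : PySem.Dict Int (List (List (String × Int)))) g =>
        d.modify (pvGen g.2) [] (fun cur => cur ++ [g.2]))
      PySem.Dict.empty).items
    = (PySem.Set.ofList (games.map (fun g => pvGen g.2))).map
        (fun gen => (gen, (games.filter (fun g => pvGen g.2 == gen)).map (fun g => g.2))) := by
  set step := fun (d : PySem.Dict Int (List (List (String × Int)))) (g : String × List (String × Int)) =>
      d.modify (pvGen g.2) [] (fun cur => cur ++ [g.2]) with hstep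
  have hnd : (games.foldl step PySem.Dict.empty).keys.Nodup := by
    rw [hstep]
    exact PySem.Dict.nodup_keys_foldl_modify_key games (fun g => pvGen g.2) []
      (fun _ g cur => cur ++ [g.2]) PySem.Dict.empty (by simp)
  have hkeys : (games.foldl step PySem.Dict.empty).keys
      = PySem.Set.ofList (games.map (fun g => pvGen g.2)) := by
    rw [hstep]
    rw [PySem.Dict.keys_foldl_modify_key games (fun g => pvGen g.2) []
      (fun _ g cur => cur ++ [g.2]) PySem.Dict.empty]
    simp [PySem.Set.update, PySem.Set.ofList_eq_foldl]
  have hget : ∀ gen, (games.foldl step PySem.Dict.empty).getD gen []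
      = (games.filter (fun g => pvGen g.2 == gen)).map (fun g => g.2) := by
    intro gen
    have hmap : games.foldl step PySem.Dict.empty
        = (games.map (fun g => (pvGen g.2, g.2))).foldl
            (fun d p => d.modify p.1 [] (fun cur => cur ++ [p.2])) PySem.Dict.empty := by
      simp only [List.foldl_map, hstep]
    rw [hmap, PySem.Dict.getD_foldl_modify_append]
    simp [List.filter_map, List.map_map, Function.comp_def]
  rw [PySem.Dict.items_eq_map_keys _ hnd [], hkeys]
  exact List.map_congr_left (fun gen _ => by rw [hget gen])

-- ===== VERDICT (by name: the statement is the Claim_ definition above) =====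
theorem parse_generations_spec : Claim_equal_parse_generations := by
  intro games _ _
  show parse_generations games = parse_generations_alt games
  rw [parse_generations, parse_generations_alt, pv_items_eq]
  exact List.map_congr_left (fun gen _ => by
    simp only [Prod.mk.injEq, true_and]
    exact congrArg _ (List.filter_congr (fun g _ => Bool.beq_comm)))
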